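-- pv_equiv track=rewrite | github.com/jcolinpatrick/kryptos | scripts/transposition/columnar/e_k4_keyword_double_columnar.py | columnar_keyword_encrypt
-- ===== SOURCE A (Python) =====
-- import math
-- from typing import Dict, List, Tuple
--
-- def keyword_to_col_order(keyword: str) -> List[int]:
--     """Convert keyword to column reading order (alphabetical rank of each letter)."""
--     kw = keyword.upper()
--     indexed = [(ch, i) for i, ch in enumerate(kw)]
--     ranked = sorted(indexed, key=lambda x: (x[0], x[1]))
--     order = [0] * len(kw)
--     for rank, (_, pos) in enumerate(ranked):
--         order[pos] = rank
--     return order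
--
-- def columnar_keyword_encrypt(text: str, keyword: str) -> str:
--     """Columnar transposition with keyword column order.
--     Write in rows of len(keyword), read columns in alphabetical keyword order.
--     """
--     width = len(keyword)
--     col_order = keyword_to_col_order(keyword)
--     length = len(text)
--     nrows = math.ceil(length / width)
--
--     grid = {}
--     for i, ch in enumerate(text):
--         r, c = divmod(i, width)
--         grid[(r, c)] = ch
--
--     result = []
--     for rank in range(width):
--         col_idx = col_order.index(rank)
--         for r in range(nrows):
--             if (r, col_idx) in grid:
--                 result.append(grid[(r, col_idx)])
--
--     return "".join(result)
-- ===== SOURCE B (Python) =====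
-- def columnar_keyword_encrypt(text: str, keyword: str) -> str:
--     """Columnar transposition: read stride slices of text in keyword alphabetical order."""
--     width = len(keyword)
--     kw = keyword.upper()
--     cols = sorted(range(width), key=lambda c: (kw[c], c))
--     return "".join(text[c::width] for c in cols)
-- ===== Notes on version B (the rewrite author's own statement) =====
-- stated objective: faster
-- what changed: B drops A's (row,col)-keyed dict grid, the rank array and the per-rank list .index scan: it sorts the column indices once by (uppercased letter, position) and concatenates the stride slices text[c::width]; Pre_ excludes the empty keyword, on which A raises ZeroDivisionError.
import Mathlib
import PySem

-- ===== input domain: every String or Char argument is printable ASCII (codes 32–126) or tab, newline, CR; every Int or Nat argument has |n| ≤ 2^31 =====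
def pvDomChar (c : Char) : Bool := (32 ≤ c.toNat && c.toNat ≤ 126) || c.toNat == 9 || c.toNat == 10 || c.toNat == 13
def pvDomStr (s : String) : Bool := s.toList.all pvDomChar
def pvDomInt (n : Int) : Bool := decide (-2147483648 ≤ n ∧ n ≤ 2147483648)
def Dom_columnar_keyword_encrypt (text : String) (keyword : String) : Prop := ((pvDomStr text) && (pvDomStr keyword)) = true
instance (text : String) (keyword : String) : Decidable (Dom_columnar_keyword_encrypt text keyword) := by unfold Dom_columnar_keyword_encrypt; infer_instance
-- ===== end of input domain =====

-- B replaces A's dict grid and per-rank .index scans by sorting the column indices once and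
-- concatenating stride slices text[c::width] (objective: faster; measured).

-- ===== PORT A =====
def keyword_to_col_order (keyword : String) : List Int :=
  let kw := (PySem.Str.upper keyword).toList
  let indexed := (PySem.List.enumerate kw).map (fun p => (p.2, p.1))
  let ranked := PySem.List.sorted indexed (fun x => toLex (x.1, x.2))   -- tuple key (x[0], x[1]) compares lexicographically
  -- for rank, (_, pos) in enumerate(ranked): order[pos] = rank   (pos is a list index, always ≥ 0)
  (PySem.List.enumerate ranked).foldl
    (fun order q => order.set q.2.2.toNat q.1)
    (List.replicate kw.length (0 : Int))

def columnar_keyword_encrypt (text : String) (keyword : String) : String :=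
  let width : Int := PySem.Str.len keyword
  let col_order := keyword_to_col_order keyword
  let length : Int := PySem.Str.len text
  -- math.ceil(length / width): the exact integer ceiling -((-length)//width); width ≠ 0 by Pre_
  let nrows : Int := -(PySem.Int.floordiv (-length) width)
  let grid : PySem.Dict (Int × Int) Char :=
    (PySem.List.enumerate text.toList).foldl
      (fun g p => g.insert (PySem.Int.floordiv p.1 width, PySem.Int.mod p.1 width) p.2)
      PySem.Dict.empty
  let result : List Char :=
    (PySem.List.pyRange 0 width).foldl (fun res rank =>
      match PySem.List.index? col_order rank with
      | some col_idx =>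
          (PySem.List.pyRange 0 nrows).foldl (fun res r =>
            if grid.contains (r, (col_idx : Int)) then res ++ [grid.getD (r, (col_idx : Int)) ' ']
            else res) res
      | none => res) []   -- none = Python ValueError; unreachable: every rank 0..width-1 occurs in col_order
  String.ofList result    -- "".join(result)

-- ===== PORT B =====
def columnar_keyword_encrypt_alt (text : String) (keyword : String) : String :=
  let width : Int := PySem.Str.len keyword
  let kw := (PySem.Str.upper keyword).toList
  let cols := PySem.List.sorted (PySem.List.pyRange 0 width) (fun c => toLex (PySem.List.pyGetD kw c ' ', c))
  -- "".join(text[c::width] for c in cols); slice? is none only for width = 0, when cols = [] and no slice is taken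
  PySem.Str.join "" (cols.map (fun c => String.ofList ((PySem.List.slice? text.toList (some c) none width).getD [])))

-- ===== PRECONDITION & SPEC =====
-- Pre_ excludes exactly the empty keyword, on which A raises ZeroDivisionError (width = 0).
def Pre_columnar_keyword_encrypt (text : String) (keyword : String) : Prop := keyword ≠ ""
instance (text : String) (keyword : String) : Decidable (Pre_columnar_keyword_encrypt text keyword) := by unfold Pre_columnar_keyword_encrypt; infer_instance
def pvWitness_columnar_keyword_encrypt : String × String := ("HELLO WORLD", "Key")

def Spec_columnar_keyword_encrypt (text : String) (keyword : String) (out : String) : Prop := out = columnar_keyword_encrypt_alt text keyword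
instance (text : String) (keyword : String) (out : String) : Decidable (Spec_columnar_keyword_encrypt text keyword out) := by unfold Spec_columnar_keyword_encrypt; infer_instance

-- ===== CLAIM (what is proved, stated in full; the proofs are below) =====
def Claim_equal_columnar_keyword_encrypt : Prop := ∀ (text : String) (keyword : String), Dom_columnar_keyword_encrypt text keyword → Pre_columnar_keyword_encrypt text keyword → Spec_columnar_keyword_encrypt text keyword (columnar_keyword_encrypt text keyword)

-- ===== LEMMAS AND PROOFS =====

def pvCol (xs : List Char) (c w : Nat) : List Char :=
  (List.range xs.length).filterMap (fun r => xs[c + w * r]?)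

theorem pvFilterMap_range_ext {β : Type} (f : Nat → Option β) (m m' : Nat) (hm : m ≤ m')
    (h : ∀ r, m ≤ r → f r = none) :
    (List.range m').filterMap f = (List.range m).filterMap f := by
  obtain ⟨k, rfl⟩ := Nat.exists_eq_add_of_le hm
  rw [List.range_add, List.filterMap_append]
  have hnil : ((List.range k).map (fun x => m + x)).filterMap f = [] := by
    refine List.filterMap_eq_nil_iff.2 ?_
    intro x hx
    simp only [List.mem_map, List.mem_range] at hx
    obtain ⟨j, _, rfl⟩ := hx
    exact h _ (Nat.le_add_right _ _)
  rw [hnil, List.append_nil]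

theorem pvSlice_eq_col (xs : List Char) (c w : Nat) (hw : 0 < w) :
    PySem.List.slice? xs (some (c : Int)) none (w : Int) = some (pvCol xs c w) := by
  have hw' : ((w:Int) = 0) = False := by simp; omega
  simp only [PySem.List.slice?, PySem.List.sliceIndices, hw']
  simp only [if_false, if_neg (by omega : ¬ ((w:Int) < 0)),
    if_neg (by omega : ¬ ((c:Int) < 0)), if_pos (by exact_mod_cast hw : (0:Int) < (w:Int))]
  set n := xs.length with hn
  congr 1
  by_cases hcn : c < n
  · rw [min_eq_left (by exact_mod_cast hcn.le), if_pos (by exact_mod_cast hcn)]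
    have hdm := Int.mul_ediv_add_emod ((n:Int) - c + w - 1) (w:Int)
    have hr0 := Int.emod_nonneg ((n:Int) - c + w - 1) (by omega : (w:Int) ≠ 0)
    have hrw := Int.emod_lt_of_pos ((n:Int) - c + w - 1) (by omega : (0:Int) < (w:Int))
    set q : Int := (((n:Int) - c + w - 1) / w) with hq
    have hq0 : 0 ≤ q := Int.ediv_nonneg (by omega) (by omega)
    have hwq : (n:Int) - c ≤ w * q := by omega
    have hcast : ((w * q.toNat : Nat) : Int) = (w:Int) * q := by
      push_cast
      rw [Int.toNat_of_nonneg hq0]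
    have harg : ∀ k : Nat, xs[((c:Int) + w * k).toNat]? = xs[c + w * k]? := by
      intro k
      have : ((c:Int) + w * k).toNat = c + w * k := by omega
      rw [this]
    simp only [harg]
    have hnone : ∀ r, q.toNat ≤ r → xs[c + w * r]? = none := by
      intro r hr
      apply List.getElem?_eq_none
      have h1 : w * q.toNat ≤ w * r := Nat.mul_le_mul_left _ hr
      omega
    by_cases hqn : q.toNat ≤ n
    · rw [pvCol, ← pvFilterMap_range_ext _ q.toNat n hqn hnone]
    · rw [pvCol, pvFilterMap_range_ext _ n q.toNat (by omega) ?_]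
      intro r hr
      apply List.getElem?_eq_none
      have h1 : r ≤ w * r := Nat.le_mul_of_pos_left r hw
      omega
  · rw [min_eq_right (by exact_mod_cast Nat.le_of_not_lt hcn), if_neg (by omega)]
    simp only [List.range_zero, List.filterMap_nil, pvCol]
    symm
    refine List.filterMap_eq_nil_iff.2 ?_
    intro x hx
    exact List.getElem?_eq_none (by simp at hx; omega)

theorem pvRanked_eq (kw : List Char) :
    PySem.List.sorted ((PySem.List.enumerate kw).map (fun p => (p.2, p.1)))
        (fun x => toLex (x.1, x.2)) =
      (PySem.List.sorted (PySem.List.pyRange 0 (kw.length : Int))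
          (fun c => toLex (PySem.List.pyGetD kw c ' ', c))).map
        (fun c => (PySem.List.pyGetD kw c ' ', c)) := by
  set g : Int → Char × Int := fun c => (PySem.List.pyGetD kw c ' ', c) with hg
  set cols := PySem.List.sorted (PySem.List.pyRange 0 (kw.length : Int))
      (fun c => toLex (g c)) with hcols
  have hperm : cols.Perm (PySem.List.pyRange 0 (kw.length : Int)) :=
    PySem.List.sorted_perm _ _ _
  have hind : (PySem.List.enumerate kw).map (fun p => ((p.2 : Char), p.1)) =
      (PySem.List.pyRange 0 (kw.length : Int)).map g := by
    rw [PySem.List.enumerate_eq_map_pyRange kw ' ', List.map_map]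
    simp [PySem.List.len_eq]
    exact fun a _ _ => rfl
  apply PySem.List.sorted_eq_of_perm_of_pairwise_lt
  · rw [hind]
    exact hperm.map g
  · rw [List.pairwise_map]
    have h1 : cols.Pairwise (fun a b => toLex (g a) ≤ toLex (g b)) :=
      PySem.List.sorted_pairwise _ _
    have h2 : cols.Pairwise (fun a b => a ≠ b) :=
      (hperm.nodup_iff.2 (PySem.List.nodup_pyRange_one _ _)).pairwise_of_forall_ne
        (fun a _ b _ h => h) |>.imp (fun h => h) |>.and h1 |>.imp (fun h => h.1)
    exact (h1.and h2).imp (fun ⟨hle, hne⟩ =>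
      lt_of_le_of_ne hle (fun he => hne (by
        have : (g _).2 = (g _).2 := congrArg (fun p => (ofLex p).2) he
        simpa [hg] using this)))

theorem pvSetFold_getElem? (l : List (Int × Int)) (base : List Int)
    (hnd : (l.map (·.2)).Nodup) (hb : ∀ q ∈ l, 0 ≤ q.2 ∧ q.2.toNat < base.length) (j : Nat) :
    (l.foldl (fun o q => o.set q.2.toNat q.1) base)[j]? =
      match l.find? (fun q => q.2.toNat == j) with
      | some q => if j < base.length then some q.1 else base[j]?
      | none => base[j]? := by
  induction l generalizing base with
  | nil => simp
  | cons q l ih =>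
    simp only [List.map_cons, List.nodup_cons] at hnd
    have hq := hb q (List.mem_cons_self ..)
    rw [List.foldl_cons, ih (base.set q.2.toNat q.1) hnd.2
      (by intro p hp; have := hb p (List.mem_cons_of_mem _ hp); simpa using this)]
    rw [List.find?_cons]
    by_cases hj : q.2.toNat = j
    · have hfind : l.find? (fun p => p.2.toNat == j) = none := by
        rw [List.find?_eq_none]
        intro p hp
        simp only [beq_iff_eq]
        intro hpj
        exact hnd.1 (by
          have hp2 : p.2 = q.2 := by
            have := (hb p (List.mem_cons_of_mem _ hp)).1
            omega
          rw [← hp2]; exact List.mem_map_of_mem hp)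
      rw [hfind]
      subst hj
      simp [hq.2]
    · have hbeq : (q.2.toNat == j) = false := by simpa using hj
      rw [hbeq]
      have hset : (base.set q.2.toNat q.1)[j]? = base[j]? := by
        rw [List.getElem?_set]
        simp [hj]
      have hlen : (base.set q.2.toNat q.1).length = base.length := List.length_set ..
      cases hf : l.find? (fun p => p.2.toNat == j) <;> simp [hset, hlen]

def pvCols (kw : List Char) : List Int :=
  PySem.List.sorted (PySem.List.pyRange 0 (kw.length : Int))
    (fun c => toLex (PySem.List.pyGetD kw c ' ', c))

theorem pvCols_perm (kw : List Char) : (pvCols kw).Perm (PySem.List.pyRange 0 (kw.length : Int)) :=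
  PySem.List.sorted_perm _ _ _

theorem pvCols_length (kw : List Char) : (pvCols kw).length = kw.length := by
  rw [(pvCols_perm kw).length_eq, PySem.List.length_pyRange_one]
  omega

theorem pvCols_nodup (kw : List Char) : (pvCols kw).Nodup :=
  (pvCols_perm kw).nodup_iff.2 (PySem.List.nodup_pyRange_one _ _)

theorem pvCols_mem (kw : List Char) (x : Int) : x ∈ pvCols kw ↔ 0 ≤ x ∧ x < kw.length := by
  rw [(pvCols_perm kw).mem_iff, PySem.List.mem_pyRange_one]

theorem pvEnumerate_map {α β : Type} (f : α → β) (l : List α) (s : Int) :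
    PySem.List.enumerate (l.map f) s = (PySem.List.enumerate l s).map (fun p => (p.1, f p.2)) := by
  induction l generalizing s with
  | nil => simp [PySem.List.enumerate_nil]
  | cons x xs ih => simp [PySem.List.enumerate_cons, ih]

def pvOrder (kw : List Char) : List Int :=
  (PySem.List.enumerate (pvCols kw)).foldl (fun o p => o.set p.2.toNat p.1)
    (List.replicate kw.length (0 : Int))

theorem pvOrder_getElem? (kw : List Char) (j : Nat) (hj : j < kw.length) :
    ∃ (k : Nat) (hk : k < (pvCols kw).length), (pvCols kw)[k]'hk = (j : Int) ∧
      (pvOrder kw)[j]? = some (k : Int) := by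
  have hjmem : (j : Int) ∈ pvCols kw := (pvCols_mem kw j).2 (by constructor <;> omega)
  obtain ⟨k, hk, hkj⟩ := List.getElem_of_mem hjmem
  refine ⟨k, hk, hkj, ?_⟩
  rw [pvOrder, pvSetFold_getElem? _ _
    (by rw [PySem.List.map_snd_enumerate]; exact pvCols_nodup kw)
    (by
      intro q hq
      rw [PySem.List.mem_enumerate_iff] at hq
      obtain ⟨m, hm, rfl⟩ := hq
      have := (pvCols_mem kw ((pvCols kw)[m])).1 (List.getElem_mem _)
      simp only [List.length_replicate]
      exact ⟨this.1, by omega⟩) j]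
  have hfind : (PySem.List.enumerate (pvCols kw)).find? (fun q => q.2.toNat == j) =
      some ((k : Int), (pvCols kw)[k]'hk) := by
    have hsome : ((PySem.List.enumerate (pvCols kw)).find? (fun q => q.2.toNat == j)).isSome := by
      rw [List.find?_isSome]
      refine ⟨((k : Int), (pvCols kw)[k]'hk), ?_, by simp [hkj]⟩
      rw [PySem.List.mem_enumerate_iff]
      exact ⟨k, hk, by simp⟩
    obtain ⟨a, ha⟩ := Option.isSome_iff_exists.1 hsome
    have hpa := List.find?_some ha
    have hmem := List.mem_of_find?_eq_some ha
    rw [PySem.List.mem_enumerate_iff] at hmem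
    obtain ⟨m, hm, rfl⟩ := hmem
    simp only [beq_iff_eq] at hpa
    have h0 : (0:Int) ≤ (pvCols kw)[m] := ((pvCols_mem kw _).1 (List.getElem_mem _)).1
    have hmj : (pvCols kw)[m] = (j : Int) := by omega
    have hmk : m = k := by
      rw [← hkj] at hmj
      exact (List.Nodup.getElem_inj_iff (pvCols_nodup kw)).1 hmj
    subst hmk
    rw [ha]
    simp [hmj]
  rw [hfind]
  simp [hj]

theorem pvIndex_order (kw : List Char) (rank : Nat) (hr : rank < kw.length) :
    PySem.List.index? (pvOrder kw) ((rank : Int)) =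
      some (((pvCols kw)[rank]'(by rw [pvCols_length]; omega)).toNat) := by
  have hlen : (pvOrder kw).length = kw.length := by
    rw [pvOrder]
    have : ∀ (l : List (Int × Int)) (base : List Int),
        (l.foldl (fun o q => o.set q.2.toNat q.1) base).length = base.length := by
      intro l
      induction l with
      | nil => intro base; rfl
      | cons q l ih => intro base; rw [List.foldl_cons, ih, List.length_set]
    rw [this, List.length_replicate]
  have hposmem := (pvCols_mem kw _).1 (List.getElem_mem (pvCols_length kw ▸ hr : rank < (pvCols kw).length))
  set pos : Int := (pvCols kw)[rank]'(by rw [pvCols_length]; omega) with hpos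
  have hposN : pos.toNat < kw.length := by omega
  -- order[pos] = rank
  obtain ⟨k1, hk1, hk1e, hk1g⟩ := pvOrder_getElem? kw pos.toNat hposN
  have hk1r : k1 = rank := by
    apply (List.Nodup.getElem_inj_iff (pvCols_nodup kw)).1
    rw [hk1e, hpos]
    omega
  rw [PySem.List.index?_eq_idxOf?, List.idxOf?_eq_some_iff]
  refine ⟨by omega, ?_, ?_⟩
  · have := hk1g
    rw [List.getElem?_eq_getElem (by omega)] at this
    have h2 : (pvOrder kw)[pos.toNat]'(by omega) = (k1 : Int) := by
      exact Option.some_injective _ this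
    rw [h2, hk1r]
  · intro j hjlt hje
    obtain ⟨k2, hk2, hk2e, hk2g⟩ := pvOrder_getElem? kw j (by omega)
    rw [List.getElem?_eq_getElem (by omega)] at hk2g
    have h2 : (pvOrder kw)[j]'(by omega) = (k2 : Int) := Option.some_injective _ hk2g
    rw [h2] at hje
    have hk2r : k2 = rank := by exact_mod_cast hje
    subst hk2r
    rw [← hpos] at hk2e
    omega

theorem pvFilterMap_eq_map_filter {α β : Type} (f' : α → Option β) (p : α → Bool) (fx : α → β)
    (l : List α) (h : ∀ x ∈ l, f' x = if p x = true then some (fx x) else none) :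
    l.filterMap f' = (l.filter p).map fx := by
  induction l with
  | nil => rfl
  | cons x xs ih =>
    rw [List.filterMap_cons, List.filter_cons, h x (List.mem_cons_self ..)]
    by_cases hp : p x = true <;>
      simp [hp, ih (fun y hy => h y (List.mem_cons_of_mem _ hy))]

theorem pvKeyInj (n : Nat) (w : Nat) (hw : 0 < w) :
    ((PySem.List.pyRange 0 (n : Int)).map
      (fun j => (PySem.Int.floordiv j (w : Int), PySem.Int.mod j (w : Int)))).Nodup := by
  refine List.Nodup.map_on ?_ (PySem.List.nodup_pyRange_one _ _)
  intro j1 h1 j2 h2 he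
  rw [PySem.List.mem_pyRange_one] at h1 h2
  have hwp : (0:Int) < (w:Int) := by omega
  rw [PySem.Int.floordiv_eq_ediv_of_pos, PySem.Int.floordiv_eq_ediv_of_pos,
    PySem.Int.mod_eq_emod_of_pos, PySem.Int.mod_eq_emod_of_pos] at he <;> try omega
  have e1 := Int.mul_ediv_add_emod j1 (w:Int)
  have e2 := Int.mul_ediv_add_emod j2 (w:Int)
  have hd : j1 / (w:Int) = j2 / (w:Int) := congrArg Prod.fst he
  have hm : j1 % (w:Int) = j2 % (w:Int) := congrArg Prod.snd he
  rw [hd, hm] at e1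
  omega

-- the grid dict built by A, characterised

def pvGrid (xs : List Char) (w : Int) : PySem.Dict (Int × Int) Char :=
  (PySem.List.enumerate xs).foldl
    (fun g p => g.insert (PySem.Int.floordiv p.1 w, PySem.Int.mod p.1 w) p.2)
    PySem.Dict.empty

theorem pvGrid_items (xs : List Char) (w : Nat) (hw : 0 < w) :
    (pvGrid xs (w : Int)).items =
      (PySem.List.pyRange 0 (xs.length : Int)).map
        (fun j => ((PySem.Int.floordiv j w, PySem.Int.mod j w), PySem.List.pyGetD xs j ' ')) := by
  rw [pvGrid, PySem.List.enumerate_eq_map_pyRange xs ' ', List.foldl_map]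
  rw [show (fun (g : PySem.Dict (Int × Int) Char) (j : Int) =>
      g.insert (PySem.Int.floordiv j w, PySem.Int.mod j w) (PySem.List.pyGetD xs j ' ')) =
    (fun g j => g.insert ((fun j => (PySem.Int.floordiv j w, PySem.Int.mod j w)) j)
      ((fun j => PySem.List.pyGetD xs j ' ') j)) from rfl]
  rw [PySem.List.len_eq]
  exact PySem.Dict.items_foldl_insert_fresh (PySem.List.pyRange 0 (xs.length : Int))
    (fun j => (PySem.Int.floordiv j w, PySem.Int.mod j w))
    (fun j => PySem.List.pyGetD xs j ' ') PySem.Dict.empty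
    (fun a _ => PySem.Dict.contains_empty _) (pvKeyInj xs.length w hw)

theorem pvGrid_keys (xs : List Char) (w : Nat) (hw : 0 < w) :
    (pvGrid xs (w : Int)).keys = (PySem.List.pyRange 0 (xs.length : Int)).map
      (fun j => (PySem.Int.floordiv j w, PySem.Int.mod j w)) := by
  rw [PySem.Dict.keys, pvGrid_items xs w hw, List.map_map]
  rfl

theorem pvGrid_mem_keys (xs : List Char) (w : Nat) (hw : 0 < w) (r : Int) (c : Nat)
    (hc : c < w) (hr : 0 ≤ r) :
    (r, (c : Int)) ∈ (pvGrid xs (w : Int)).keys ↔ c + w * r.toNat < xs.length := by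
  rw [pvGrid_keys xs w hw, List.mem_map]
  constructor
  · rintro ⟨j, hj, he⟩
    rw [PySem.List.mem_pyRange_one] at hj
    rw [PySem.Int.floordiv_eq_ediv_of_pos (by omega), PySem.Int.mod_eq_emod_of_pos (by omega),
      Prod.mk.injEq] at he
    have hdm := Int.mul_ediv_add_emod j (w : Int)
    rw [he.1, he.2] at hdm
    -- j = w * r + c
    have hcast : (w:Int) * r = ((w * r.toNat : Nat) : Int) := by
      push_cast
      rw [Int.toNat_of_nonneg hr]
    omega
  · intro hlt
    refine ⟨(c : Int) + w * r, ?_, ?_⟩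
    · rw [PySem.List.mem_pyRange_one]
      have : (w:Int) * r = (w * r.toNat : Nat) := by
        push_cast
        rw [Int.toNat_of_nonneg hr]
      omega
    · rw [PySem.Int.floordiv_eq_ediv_of_pos (by omega), PySem.Int.mod_eq_emod_of_pos (by omega)]
      have hd : ((c : Int) + w * r) / w = r := by
        rw [Int.add_mul_ediv_left _ _ (by omega : (w:Int) ≠ 0),
          Int.ediv_eq_zero_of_lt (by omega) (by omega)]
        omega
      have hm : ((c : Int) + w * r) % w = c := by
        rw [Int.add_mul_emod_self_left]
        exact Int.emod_eq_of_lt (by omega) (by omega)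
      rw [hd, hm]

theorem pvGrid_getD (xs : List Char) (w : Nat) (hw : 0 < w) (r : Int) (c : Nat)
    (hc : c < w) (hr : 0 ≤ r) (hlt : c + w * r.toNat < xs.length) :
    (pvGrid xs (w : Int)).getD (r, (c : Int)) ' ' = xs[c + w * r.toNat]'hlt := by
  have hkn : (pvGrid xs (w : Int)).keys.Nodup := by
    rw [pvGrid_keys xs w hw]
    exact pvKeyInj xs.length w hw
  refine PySem.Dict.getD_of_mem_items _ ?_ hkn ' '
  rw [pvGrid_items xs w hw, List.mem_map]
  refine ⟨(c : Int) + w * r, ?_, ?_⟩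
  · rw [PySem.List.mem_pyRange_one]
    have hcast : (w:Int) * r = ((w * r.toNat : Nat) : Int) := by
      push_cast
      rw [Int.toNat_of_nonneg hr]
    omega
  · rw [PySem.Int.floordiv_eq_ediv_of_pos (by omega), PySem.Int.mod_eq_emod_of_pos (by omega)]
    have hd : ((c : Int) + w * r) / w = r := by
      rw [Int.add_mul_ediv_left _ _ (by omega : (w:Int) ≠ 0),
        Int.ediv_eq_zero_of_lt (by omega) (by omega)]
      omega
    have hm : ((c : Int) + w * r) % w = c := by
      rw [Int.add_mul_emod_self_left]
      exact Int.emod_eq_of_lt (by omega) (by omega)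
    rw [hd, hm]
    have hg : PySem.List.pyGetD xs ((c : Int) + w * r) ' ' = xs[c + w * r.toNat]'hlt := by
      have hidx : ((c : Int) + w * r) = ((c + w * r.toNat : Nat) : Int) := by
        push_cast
        rw [Int.toNat_of_nonneg hr]
      rw [hidx, PySem.List.pyGetD_natCast]
      exact List.getD_eq_getElem ..
    rw [hg]

theorem pvInner_eq_col (xs : List Char) (w : Nat) (hw : 0 < w) (c : Nat) (hc : c < w)
    (res : List Char) :
    (PySem.List.pyRange 0 (-(PySem.Int.floordiv (-(xs.length : Int)) (w : Int)))).foldl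
        (fun res r =>
          if (pvGrid xs (w : Int)).contains (r, (c : Int)) then
            res ++ [(pvGrid xs (w : Int)).getD (r, (c : Int)) ' ']
          else res) res =
      res ++ pvCol xs c w := by
  set n := xs.length with hn
  set nrows : Int := -(PySem.Int.floordiv (-(n : Int)) (w : Int)) with hnr
  have hq : PySem.Int.floordiv (-(n : Int)) (w : Int) = (-(n : Int)) / w :=
    PySem.Int.floordiv_eq_ediv_of_pos (by omega)
  have hq0 : (-(n : Int)) / w ≤ 0 := Int.ediv_nonpos_of_nonpos_of_neg (by omega) (by omega)
  have hdm := Int.mul_ediv_add_emod (-(n : Int)) (w : Int)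
  have hr0 := Int.emod_nonneg (-(n : Int)) (by omega : (w:Int) ≠ 0)
  have hrw := Int.emod_lt_of_pos (-(n : Int)) (by omega : (0:Int) < (w:Int))
  have hN : (w : Int) * nrows ≥ n := by
    rw [hnr, hq]
    have hring : (w:Int) * -((-(n:Int))/(w:Int)) = -((w:Int)*((-(n:Int))/(w:Int))) := by ring
    omega
  have hNn : nrows.toNat = nrows := by
    rw [hnr, hq]
    omega
  -- w * nrows.toNat ≥ n as naturals
  have hNnat : n ≤ w * nrows.toNat := by
    have : ((w * nrows.toNat : Nat) : Int) = (w:Int) * nrows := by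
      push_cast
      rw [hNn]
    omega
  -- the loop range as a range of naturals
  rw [PySem.List.pyRange_one]
  simp only [Int.sub_zero]
  rw [List.foldl_map, PySem.List.foldl_append_if (fun r : Nat => (pvGrid xs (w:Int)).contains ((0 + (r:Int)), (c:Int)))
      (fun r : Nat => (pvGrid xs (w:Int)).getD ((0 + (r:Int)), (c:Int)) ' ')]
  congr 1
  rw [← pvFilterMap_eq_map_filter (fun r : Nat => xs[c + w * r]?) _ _ _ ?hcond]
  case hcond =>
    intro r hr
    beta_reduce
    have hcont : (pvGrid xs (w:Int)).contains ((0 + (r:Int)), (c:Int)) = decide (c + w * r < n) := by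
      rw [PySem.Dict.contains_eq_decide_mem_keys, decide_eq_decide]
      rw [show (0 + (r:Int)) = ((r:Nat):Int) by omega]
      rw [pvGrid_mem_keys xs w hw _ c hc (by omega)]
      simp only [Int.toNat_natCast, hn]
    rw [hcont]
    by_cases hin : c + w * r < n
    · rw [List.getElem?_eq_getElem hin]
      simp only [hin, decide_true, if_true]
      congr 1
      rw [show (0 + (r:Int)) = ((r:Nat):Int) by omega]
      rw [pvGrid_getD xs w hw _ c hc (by omega) (by simpa using hin)]
      simp
    · rw [List.getElem?_eq_none (by omega)]
      simp [hin]
  -- extend/contract the ranges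
  rw [pvCol, ← hn]
  by_cases hle : nrows.toNat ≤ n
  · exact (pvFilterMap_range_ext _ _ _ hle (fun r hr =>
      List.getElem?_eq_none (by
        have h1 : w * nrows.toNat ≤ w * r := Nat.mul_le_mul_left _ hr
        omega))).symm
  · exact pvFilterMap_range_ext _ _ _ (by omega) (fun r hr =>
      List.getElem?_eq_none (by
        have h1 : r ≤ w * r := Nat.le_mul_of_pos_left r hw
        omega))

-- A's keyword_to_col_order is the permutation fold pvOrder over the sorted column list
theorem pvColOrder_eq (keyword : String) :
    keyword_to_col_order keyword = pvOrder ((PySem.Str.upper keyword).toList) := by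
  set kw := (PySem.Str.upper keyword).toList with hkw
  rw [keyword_to_col_order, pvOrder]
  rw [pvRanked_eq kw, pvEnumerate_map, List.foldl_map]
  rfl

-- "".join over singleton-built strings is ofList of the concatenation
theorem pvJoin_ofList (parts : List (List Char)) :
    PySem.Str.join "" (parts.map String.ofList) = String.ofList parts.flatten := by
  rw [← String.ofList_toList (s := PySem.Str.join "" (parts.map String.ofList))]
  congr 1
  rw [PySem.Str.toList_join, List.map_map]
  have h1 : (String.toList ∘ String.ofList) = (id : List Char → List Char) := by
    funext l
    simp [String.toList_ofList]
  rw [h1, List.map_id]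
  show List.intercalate [] parts = parts.flatten
  induction parts with
  | nil => simp [List.intercalate]
  | cons x xs ih => cases xs <;> simp_all [List.intercalate]

-- ===== VERDICT (by name: the statement is the Claim_ definition above) =====
set_option maxHeartbeats 2000000 in
theorem columnar_keyword_encrypt_spec : Claim_equal_columnar_keyword_encrypt := by
  intro text keyword _hdom hpre
  unfold Spec_columnar_keyword_encrypt
  set xs := text.toList with hxs
  set kw := (PySem.Str.upper keyword).toList with hkw
  have hlen : kw.length = keyword.toList.length := by
    rw [hkw, PySem.Str.toList_upper]
    simp [PySem.Chars.upper]
  have hne : keyword.toList ≠ [] := by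
    intro h
    exact hpre (by rw [← String.ofList_toList (s := keyword), h])
  have hw : 0 < kw.length := by
    rw [hlen]
    exact List.length_pos_iff.2 hne
  rw [columnar_keyword_encrypt, columnar_keyword_encrypt_alt]
  simp only [PySem.Str.len_eq, pvColOrder_eq, ← hkw, ← hxs]
  rw [show ((keyword.toList.length : Int)) = (kw.length : Int) by exact_mod_cast hlen.symm]
  -- outer loop: each rank contributes the column cols[rank]
  rw [PySem.List.foldl_congr_mem _ _
    (fun (res : List Char) (rank : Int) =>
      res ++ pvCol xs ((PySem.List.pyGetD (pvCols kw) rank 0).toNat) kw.length) _ ?hbody]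
  case hbody =>
    intro acc rank hrank
    beta_reduce
    rw [PySem.List.mem_pyRange_one] at hrank
    have hrn : rank = ((rank.toNat : Nat) : Int) := by omega
    rw [hrn]
    have hrlt : rank.toNat < kw.length := by omega
    rw [pvIndex_order kw rank.toNat hrlt]
    have hget : PySem.List.pyGetD (pvCols kw) ((rank.toNat : Nat) : Int) 0 =
        (pvCols kw)[rank.toNat]'(by rw [pvCols_length]; omega) := by
      rw [PySem.List.pyGetD_natCast]
      exact List.getD_eq_getElem ..
    rw [hget]
    have hc : ((pvCols kw)[rank.toNat]'(by rw [pvCols_length]; omega)).toNat < kw.length := by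
      have := (pvCols_mem kw _).1 (List.getElem_mem (pvCols_length kw ▸ hrlt : rank.toNat < (pvCols kw).length))
      omega
    exact pvInner_eq_col xs kw.length hw _ hc acc
  rw [PySem.List.foldl_append_eq_flatMap, List.nil_append, List.flatMap_def]
  -- the ranks traverse exactly the sorted column list
  rw [show (fun rank : Int => pvCol xs (PySem.List.pyGetD (pvCols kw) rank 0).toNat kw.length) =
      ((fun pos : Int => pvCol xs pos.toNat kw.length) ∘
        (fun rank : Int => PySem.List.pyGetD (pvCols kw) rank 0)) from rfl]
  rw [← List.map_map (g := fun pos : Int => pvCol xs pos.toNat kw.length)]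
  rw [show ((kw.length : Int)) = PySem.List.len (pvCols kw) by
    rw [PySem.List.len_eq, pvCols_length]]
  rw [PySem.List.map_pyGetD_pyRange_zero]
  -- B: each slice is the same column
  rw [show PySem.List.sorted (PySem.List.pyRange 0 (PySem.List.len (pvCols kw)))
      (fun c => toLex (PySem.List.pyGetD kw c ' ', c)) = pvCols kw by
    rw [PySem.List.len_eq, pvCols_length, pvCols]]
  rw [List.map_congr_left (l := pvCols kw)
    (g := fun c : Int => String.ofList (pvCol xs c.toNat kw.length)) ?hslice]
  case hslice =>
    intro c hcmem
    have hcb := (pvCols_mem kw c).1 hcmem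
    have hcn : c = ((c.toNat : Nat) : Int) := by omega
    rw [hcn, show PySem.List.len (pvCols kw) = ((kw.length : Nat) : Int) by
      rw [PySem.List.len_eq, pvCols_length],
      pvSlice_eq_col xs c.toNat kw.length hw]
    rfl
  rw [show (fun c : Int => String.ofList (pvCol xs c.toNat kw.length)) =
      (String.ofList ∘ fun c : Int => pvCol xs c.toNat kw.length) from rfl]
  rw [← List.map_map (f := fun c : Int => pvCol xs c.toNat kw.length), pvJoin_ofList]
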